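-- pv_equiv track=rewrite | github.com/ServiceLayerNetworking/SLATE | global-controller/optimizer_header.py | merge_callgraph
-- ===== SOURCE A (Python) =====
-- def merge_callgraph(callgraph):
--     merged_callgraph = dict()
--     for key in callgraph:
--         for parent_svc in callgraph[key]:
--             if parent_svc not in merged_callgraph:
--                 merged_callgraph[parent_svc] = list()
--             for child_svc in callgraph[key][parent_svc]:
--                 if child_svc in merged_callgraph[parent_svc]:
--                     continue
--                 merged_callgraph[parent_svc].append(child_svc)
--     return merged_callgraph
-- ===== SOURCE B (Python) =====
-- def merge_callgraph(callgraph):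
--     # Phase 1: gather every child of each parent across all callgraphs (duplicates kept).
--     gathered = dict()
--     for key in callgraph:
--         for parent_svc in callgraph[key]:
--             gathered[parent_svc] = gathered.get(parent_svc, []) + callgraph[key][parent_svc]
--     # Phase 2: deduplicate each parent's children, preserving first-occurrence order.
--     return {parent: list(dict.fromkeys(children)) for parent, children in gathered.items()}
-- ===== Notes on version B (the rewrite author's own statement) =====
-- stated objective: alternative
-- what changed: Replaces A's fused per-child membership-check dedup inside the merge loop with two separate phases: a gather pass concatenating all children per parent (empty lists still register the parent), then a distinct dedup pass via list(dict.fromkeys(...)) preserving first-occurrence order.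
import Mathlib
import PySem

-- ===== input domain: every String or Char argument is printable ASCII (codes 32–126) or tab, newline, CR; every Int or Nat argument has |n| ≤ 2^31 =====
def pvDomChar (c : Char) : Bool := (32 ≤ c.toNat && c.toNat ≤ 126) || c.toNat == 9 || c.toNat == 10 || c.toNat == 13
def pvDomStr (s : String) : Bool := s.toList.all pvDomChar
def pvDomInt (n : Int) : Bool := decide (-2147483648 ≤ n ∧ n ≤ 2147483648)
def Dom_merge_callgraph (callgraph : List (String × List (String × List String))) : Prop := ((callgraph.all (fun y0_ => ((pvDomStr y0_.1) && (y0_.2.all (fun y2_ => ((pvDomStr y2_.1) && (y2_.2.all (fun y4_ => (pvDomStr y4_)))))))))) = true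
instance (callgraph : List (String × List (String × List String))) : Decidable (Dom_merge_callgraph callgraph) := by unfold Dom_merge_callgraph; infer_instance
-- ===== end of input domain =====

-- B replaces A's fused membership-check dedup with a gather pass (concatenate all children per parent)
-- followed by a separate order-preserving dedup pass (list(dict.fromkeys(...))); objective: alternative decomposition.

-- ===== PORT A =====
def merge_callgraph (callgraph : List (String × List (String × List String))) : List (String × List String) :=
  (callgraph.foldl
    (fun merged entry =>
      entry.2.foldl
        (fun merged pc =>
          (pc.2.foldl
            (fun m c =>
              if c ∈ m.getD pc.1 [] then m
              else m.insert pc.1 (m.getD pc.1 [] ++ [c]))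
            (if merged.contains pc.1 then merged else merged.insert pc.1 ([] : List String))))
        merged)
    (PySem.Dict.empty : PySem.Dict String (List String))).items

-- ===== PORT B =====
def merge_callgraph_alt (callgraph : List (String × List (String × List String))) : List (String × List String) :=
  let gathered :=
    callgraph.foldl
      (fun g entry =>
        entry.2.foldl (fun g pc => g.insert pc.1 (g.getD pc.1 [] ++ pc.2)) g)
      (PySem.Dict.empty : PySem.Dict String (List String))
  gathered.items.map (fun q => (q.1, PySem.List.dedup q.2))

-- ===== PRECONDITION & SPEC =====
def Spec_merge_callgraph (callgraph : List (String × List (String × List String))) (out : List (String × List String)) : Prop := out = merge_callgraph_alt callgraph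
instance (callgraph : List (String × List (String × List String))) (out : List (String × List String)) : Decidable (Spec_merge_callgraph callgraph out) := by unfold Spec_merge_callgraph; infer_instance

-- ===== CLAIM (what is proved, stated in full; the proofs are below) =====
def Claim_equal_merge_callgraph : Prop := ∀ (callgraph : List (String × List (String × List String))), Dom_merge_callgraph callgraph → Spec_merge_callgraph callgraph (merge_callgraph callgraph)

-- ===== LEMMAS AND PROOFS =====

-- the per-entry dedup that turns B's gathered dict into A's dict
def pvF (q : String × List String) : String × List String := (q.1, PySem.List.dedup q.2)

theorem pv_contains_rel (d e : PySem.Dict String (List String))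
    (h : e.items = d.items.map pvF) (k : String) :
    e.contains k = d.contains k := by
  have he : e.contains k = e.items.any (fun p => p.1 == k) := rfl
  have hd : d.contains k = d.items.any (fun p => p.1 == k) := rfl
  rw [he, hd, h, List.any_map]
  rfl

theorem pv_getD_rel (d e : PySem.Dict String (List String))
    (h : e.items = d.items.map pvF) (k : String) :
    e.getD k [] = PySem.List.dedup (d.getD k []) := by
  have he : e.getD k [] = ((e.items.find? (fun p => p.1 == k)).map (·.2)).getD [] := rfl
  have hd : d.getD k [] = ((d.items.find? (fun p => p.1 == k)).map (·.2)).getD [] := rfl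
  rw [he, hd, h, List.find?_map]
  have hpred : ((fun (p : String × List String) => p.1 == k) ∘ pvF) = (fun p => p.1 == k) := rfl
  rw [hpred]
  cases d.items.find? (fun p => p.1 == k) <;> rfl

theorem pv_insert_rel (d e : PySem.Dict String (List String))
    (h : e.items = d.items.map pvF) (k : String) (v : List String) :
    (e.insert k (PySem.List.dedup v)).items = (d.insert k v).items.map pvF := by
  by_cases hc : d.contains k = true
  · have hce : e.contains k = true := (pv_contains_rel d e h k).trans hc
    rw [PySem.Dict.items_insert_of_contains _ _ hce,
        PySem.Dict.items_insert_of_contains _ _ hc, h,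
        List.map_map, List.map_map]
    refine List.map_congr_left (fun p _ => ?_)
    simp only [Function.comp, pvF]
    by_cases hpk : p.1 == k
    · simp [hpk]
    · simp [hpk]
  · have hce : e.contains k = false := by
      rw [pv_contains_rel d e h k]; simpa using hc
    rw [PySem.Dict.items_insert_of_not_contains _ _ hce,
        PySem.Dict.items_insert_of_not_contains _ _ (by simpa using hc), h, List.map_append]
    rfl

theorem pv_dedup_insert_congr (d : PySem.Dict String (List String)) (k : String)
    (v w : List String) (hvw : PySem.List.dedup v = PySem.List.dedup w) :
    (d.insert k v).items.map pvF = (d.insert k w).items.map pvF := by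
  have hvw' : PySem.Set.ofList v = PySem.Set.ofList w := by
    simpa [PySem.List.dedup_eq_ofList] using hvw
  by_cases hc : d.contains k = true
  · rw [PySem.Dict.items_insert_of_contains _ _ hc,
        PySem.Dict.items_insert_of_contains _ _ hc, List.map_map, List.map_map]
    refine List.map_congr_left (fun p _ => ?_)
    simp only [Function.comp, pvF]
    by_cases hpk : p.1 == k
    · simp [hpk, hvw']
    · simp [hpk]
  · rw [PySem.Dict.items_insert_of_not_contains _ _ (by simpa using hc),
        PySem.Dict.items_insert_of_not_contains _ _ (by simpa using hc),
        List.map_append, List.map_append]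
    simp [pvF, hvw']

theorem pv_dedup_append_singleton (L : List String) (c : String) :
    PySem.List.dedup (L ++ [c]) = if c ∈ PySem.List.dedup L then PySem.List.dedup L else PySem.List.dedup L ++ [c] := by
  simp only [PySem.List.dedup_eq_ofList, PySem.Set.ofList_append_singleton, PySem.Set.add_eq_ite]

theorem pv_inner (parent : String) (children : List String) :
    ∀ (d e : PySem.Dict String (List String)),
      e.items = (d.insert parent (d.getD parent [])).items.map pvF →
      (children.foldl
        (fun m c =>
          if c ∈ m.getD parent [] then m
          else m.insert parent (m.getD parent [] ++ [c])) e).items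
      = (d.insert parent (d.getD parent [] ++ children)).items.map pvF := by
  induction children with
  | nil => intro d e h; simpa using h
  | cons c cs ih =>
    intro d e h
    have hg : e.getD parent [] = PySem.List.dedup (d.getD parent []) := by
      rw [pv_getD_rel _ _ h parent, PySem.Dict.getD_insert_self]
    have hins : (d.insert parent (d.getD parent [] ++ [c])).insert parent
        ((d.getD parent [] ++ [c]) ++ cs) = d.insert parent (d.getD parent [] ++ c :: cs) := by
      rw [PySem.Dict.insert_insert_self, List.append_assoc]; rfl
    simp only [List.foldl_cons]
    by_cases hmem : c ∈ e.getD parent []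
    · rw [if_pos hmem]
      have hd : PySem.List.dedup (d.getD parent [] ++ [c]) = PySem.List.dedup (d.getD parent []) := by
        rw [pv_dedup_append_singleton, if_pos (hg ▸ hmem)]
      have h' : e.items = ((d.insert parent (d.getD parent [] ++ [c])).insert parent
          ((d.insert parent (d.getD parent [] ++ [c])).getD parent [])).items.map pvF := by
        rw [PySem.Dict.getD_insert_self, PySem.Dict.insert_insert_self, h]
        exact pv_dedup_insert_congr d parent _ _ hd.symm
      have := ih (d.insert parent (d.getD parent [] ++ [c])) e h'
      rw [this, PySem.Dict.getD_insert_self, hins]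
    · rw [if_neg hmem]
      have hd : PySem.List.dedup (d.getD parent []) ++ [c]
          = PySem.List.dedup (d.getD parent [] ++ [c]) := by
        rw [pv_dedup_append_singleton, if_neg (hg ▸ hmem)]
      have h' : (e.insert parent (e.getD parent [] ++ [c])).items
          = ((d.insert parent (d.getD parent [] ++ [c])).insert parent
              ((d.insert parent (d.getD parent [] ++ [c])).getD parent [])).items.map pvF := by
        rw [PySem.Dict.getD_insert_self, PySem.Dict.insert_insert_self, hg, hd,
            ← PySem.Dict.insert_insert_self d parent (d.getD parent []) (d.getD parent [] ++ [c])]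
        exact pv_insert_rel _ _ h parent _
      have := ih (d.insert parent (d.getD parent [] ++ [c])) (e.insert parent (e.getD parent [] ++ [c])) h'
      rw [this, PySem.Dict.getD_insert_self, hins]

theorem pv_step (parent : String) (children : List String)
    (d e : PySem.Dict String (List String))
    (hnd : d.keys.Nodup) (h : e.items = d.items.map pvF) :
    (children.foldl
      (fun m c =>
        if c ∈ m.getD parent [] then m
        else m.insert parent (m.getD parent [] ++ [c]))
      (if e.contains parent then e else e.insert parent ([] : List String))).items
    = (d.insert parent (d.getD parent [] ++ children)).items.map pvF := by
  by_cases hc : d.contains parent = true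
  · rw [if_pos ((pv_contains_rel d e h parent).trans hc)]
    refine pv_inner parent children d e ?_
    rw [PySem.Dict.items_insert_of_contains _ _ hc, h, List.map_map]
    refine (List.map_congr_left (fun p hp => ?_)).symm
    simp only [Function.comp, pvF]
    by_cases hpk : p.1 == parent
    · have hpk' : p.1 = parent := by simpa using hpk
      have hval : d.getD parent [] = p.2 := by
        have hmem : (parent, p.2) ∈ d.items := by rw [← hpk']; simpa using hp
        exact PySem.Dict.getD_of_mem_items _ hmem hnd []
      simp [hpk', hval]
    · simp [hpk]
  · have hce : e.contains parent = false := by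
      rw [pv_contains_rel d e h parent]; simpa using hc
    rw [if_neg (by simp [hce])]
    refine pv_inner parent children d (e.insert parent []) ?_
    have hgd : d.getD parent [] = [] := PySem.Dict.getD_of_not_contains _ _ (by simpa using hc)
    rw [hgd, PySem.Dict.items_insert_of_not_contains _ _ hce,
        PySem.Dict.items_insert_of_not_contains _ _ (by simpa using hc), h, List.map_append]
    rfl

theorem pv_middle (l : List (String × List String)) :
    ∀ (d e : PySem.Dict String (List String)),
      d.keys.Nodup → e.items = d.items.map pvF →
      (l.foldl
        (fun merged pc =>
          (pc.2.foldl
            (fun m c =>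
              if c ∈ m.getD pc.1 [] then m
              else m.insert pc.1 (m.getD pc.1 [] ++ [c]))
            (if merged.contains pc.1 then merged else merged.insert pc.1 ([] : List String))))
        e).items
      = (l.foldl (fun g pc => g.insert pc.1 (g.getD pc.1 [] ++ pc.2)) d).items.map pvF := by
  induction l with
  | nil => intro d e _ h; simpa using h
  | cons pc rest ih =>
    intro d e hnd h
    simp only [List.foldl_cons]
    exact ih (d.insert pc.1 (d.getD pc.1 [] ++ pc.2)) _
      (PySem.Dict.nodup_keys_insert _ _ _ hnd)
      (pv_step pc.1 pc.2 d e hnd h)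

theorem pv_outer (cg : List (String × List (String × List String))) :
    ∀ (d e : PySem.Dict String (List String)),
      d.keys.Nodup → e.items = d.items.map pvF →
      (cg.foldl
        (fun merged entry =>
          entry.2.foldl
            (fun merged pc =>
              (pc.2.foldl
                (fun m c =>
                  if c ∈ m.getD pc.1 [] then m
                  else m.insert pc.1 (m.getD pc.1 [] ++ [c]))
                (if merged.contains pc.1 then merged else merged.insert pc.1 ([] : List String))))
            merged)
        e).items
      = (cg.foldl
          (fun g entry =>
            entry.2.foldl (fun g pc => g.insert pc.1 (g.getD pc.1 [] ++ pc.2)) g)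
          d).items.map pvF := by
  induction cg with
  | nil => intro d e _ h; simpa using h
  | cons entry rest ih =>
    intro d e hnd h
    simp only [List.foldl_cons]
    refine ih _ _ ?_ (pv_middle entry.2 d e hnd h)
    · clear h ih
      induction entry.2 generalizing d with
      | nil => exact hnd
      | cons pc ps ih2 =>
        exact ih2 (d.insert pc.1 (d.getD pc.1 [] ++ pc.2))
          (PySem.Dict.nodup_keys_insert _ _ _ hnd)

-- ===== VERDICT (by name: the statement is the Claim_ definition above) =====
theorem merge_callgraph_spec : Claim_equal_merge_callgraph := by
  intro cg _
  unfold Spec_merge_callgraph merge_callgraph merge_callgraph_alt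
  exact pv_outer cg PySem.Dict.empty PySem.Dict.empty (by simp) rfl
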